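-- pv_equiv track=rewrite | github.com/xremis22/univ-tln | L2/i33/I33/TP1/2023/ex6.py | recherche2
-- ===== SOURCE A (Python) =====
-- def recherche2(L, S, p):
--     R = []
--     k = 0
--     while(k<len(L)-p):
--         cpt = L[k]
--         i = k + 1
--         while(p+k >= i):
--             cpt += L[i]
--             i += 1
--         if(cpt >= S):
--             R += [k]
--         k += 1
--     return R
-- ===== SOURCE B (Python) =====
-- def recherche2(L, S, p):
--     n = len(L)
--     s = sum(L[:p + 1])
--     R = []
--     for k in range(n - p):
--         if k > 0:
--             s += L[k + p] - L[k - 1]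
--         if s >= S:
--             R.append(k)
--     return R
-- ===== Notes on version B (the rewrite author's own statement) =====
-- stated objective: faster
-- what changed: Replaces the nested rescan of each window (inner while loop summing p+1 elements per position) by a single-pass sliding window that updates one running sum by adding the entering and subtracting the leaving element.
-- outside the precondition, e.g. on recherche2([1, 2, 3], 5, -1): A raises IndexError, B returns []
import Mathlib
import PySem

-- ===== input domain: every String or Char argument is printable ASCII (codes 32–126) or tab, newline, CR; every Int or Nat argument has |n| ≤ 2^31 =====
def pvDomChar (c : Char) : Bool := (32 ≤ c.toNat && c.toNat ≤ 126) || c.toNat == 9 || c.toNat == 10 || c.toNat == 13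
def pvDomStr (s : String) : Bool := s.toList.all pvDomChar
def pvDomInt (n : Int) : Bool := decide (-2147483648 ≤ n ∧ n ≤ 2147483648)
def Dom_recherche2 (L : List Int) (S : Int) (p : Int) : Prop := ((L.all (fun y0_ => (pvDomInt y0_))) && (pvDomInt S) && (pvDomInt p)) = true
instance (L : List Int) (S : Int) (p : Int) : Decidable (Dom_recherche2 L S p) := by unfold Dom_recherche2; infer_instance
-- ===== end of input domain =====

-- B replaces A's per-position window rescan by a single-pass sliding window (running sum); measured asymptotically faster.


-- ===== PORT A =====
-- inner while loop: 'while p+k >= i: cpt += L[i]; i += 1'  (bound = p+k; fuel = exact iteration count p under Pre_)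
def pvA_inner (L : List Int) (bound cpt i : Int) : Nat → Int
  | 0 => cpt
  | f + 1 =>
    if bound ≥ i then pvA_inner L bound (cpt + PySem.List.pyGetD L i 0) (i + 1) f
    else cpt
-- outer while loop over k; L[k] / L[i] via pyGetD 0 (exact under Pre_, where all indices are in range)
def pvA_outer (L : List Int) (S p k : Int) (R : List Int) : Nat → List Int
  | 0 => R
  | f + 1 =>
    if k < (L.length : Int) - p then
      let cpt := pvA_inner L (p + k) (PySem.List.pyGetD L k 0) (k + 1) p.toNat
      pvA_outer L S p (k + 1) (if cpt ≥ S then R ++ [k] else R) f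
    else R

def recherche2 (L : List Int) (S : Int) (p : Int) : List Int :=
  pvA_outer L S p 0 [] ((L.length : Int) - p).toNat

-- ===== PORT B =====
-- one sliding-window pass: s starts as sum(L[:p+1]); each step adds the entering, subtracts the leaving element
def recherche2_alt (L : List Int) (S : Int) (p : Int) : List Int :=
  let n : Int := L.length
  let s0 := (PySem.List.slice L none (some (p + 1))).sum
  ((PySem.List.pyRange 0 (n - p) 1).foldl
    (fun (st : Int × List Int) k =>
      let s := if k > 0 then st.1 + PySem.List.pyGetD L (k + p) 0 - PySem.List.pyGetD L (k - 1) 0 else st.1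
      (s, if s ≥ S then st.2 ++ [k] else st.2))
    (s0, [])).2

-- ===== PRECONDITION & SPEC =====
-- A raises IndexError whenever p < 0 (it then reads past the end of L); Pre_ excludes exactly those inputs.
def Pre_recherche2 (L : List Int) (S : Int) (p : Int) : Prop := 0 ≤ p
instance (L : List Int) (S : Int) (p : Int) : Decidable (Pre_recherche2 L S p) := by unfold Pre_recherche2; infer_instance
def pvWitness_recherche2 : List Int × Int × Int := ([1, 5, 2, 4], 6, 1)

def Spec_recherche2 (L : List Int) (S : Int) (p : Int) (out : List Int) : Prop := out = recherche2_alt L S p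
instance (L : List Int) (S : Int) (p : Int) (out : List Int) : Decidable (Spec_recherche2 L S p out) := by unfold Spec_recherche2; infer_instance

-- ===== CLAIM (what is proved, stated in full; the proofs are below) =====
def Claim_equal_recherche2 : Prop := ∀ (L : List Int) (S : Int) (p : Int), Dom_recherche2 L S p → Pre_recherche2 L S p → Spec_recherche2 L S p (recherche2 L S p)

-- ===== LEMMAS AND PROOFS =====

-- sum of the m elements starting at index i (out-of-range reads count 0, matching pyGetD's default)
def pvSumFrom (L : List Int) (i : Int) : Nat → Int
  | 0 => 0
  | m + 1 => PySem.List.pyGetD L i 0 + pvSumFrom L (i + 1) m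

-- the window sum A computes at position k (p+1 elements from k)
def pvWin (L : List Int) (p k : Int) : Int := pvSumFrom L k (p.toNat + 1)

-- reference result: positions k, k+1, … (f of them) whose window sum is ≥ S
def pvWinList (L : List Int) (S p k : Int) : Nat → List Int
  | 0 => []
  | f + 1 => (if pvWin L p k ≥ S then [k] else []) ++ pvWinList L S p (k + 1) f

theorem pvSumFrom_succ_right (L : List Int) (m : Nat) : ∀ i : Int,
    pvSumFrom L i (m + 1) = pvSumFrom L i m + PySem.List.pyGetD L (i + m) 0 := by
  induction m with
  | zero => intro i; simp [pvSumFrom]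
  | succ m ih =>
    intro i
    have hL : pvSumFrom L i (m + 1 + 1) = PySem.List.pyGetD L i 0 + pvSumFrom L (i + 1) (m + 1) := rfl
    have hR : pvSumFrom L i (m + 1) = PySem.List.pyGetD L i 0 + pvSumFrom L (i + 1) m := rfl
    rw [hL, hR, ih (i + 1)]
    have hc : (i + 1 + (m : Int)) = i + ((m + 1 : Nat) : Int) := by push_cast; ring
    rw [hc, add_assoc]

theorem pvA_inner_eq (L : List Int) : ∀ (f : Nat) (bound cpt i : Int),
    bound - i + 1 = f → pvA_inner L bound cpt i f = cpt + pvSumFrom L i f := by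
  intro f
  induction f with
  | zero => intro bound cpt i _; simp [pvA_inner, pvSumFrom]
  | succ f ih =>
    intro bound cpt i h
    have hge : bound ≥ i := by omega
    rw [pvA_inner, if_pos hge, ih bound _ (i + 1) (by push_cast at h ⊢; omega)]
    simp [pvSumFrom]
    ring

-- sliding-window identity: the next window sum from the previous one
theorem pvWin_slide (L : List Int) (p k : Int) (hp : 0 ≤ p) (_hk : 1 ≤ k) :
    pvWin L p k = pvWin L p (k - 1) + PySem.List.pyGetD L (k + p) 0 - PySem.List.pyGetD L (k - 1) 0 := by
  have h1 : pvWin L p (k - 1) = PySem.List.pyGetD L (k - 1) 0 + pvSumFrom L k p.toNat := by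
    show pvSumFrom L (k - 1) (p.toNat + 1) = _
    simp [pvSumFrom]
  have h2 : pvWin L p k = pvSumFrom L k p.toNat + PySem.List.pyGetD L (k + p) 0 := by
    have := pvSumFrom_succ_right L p.toNat k
    rw [pvWin, this]
    congr 2
    omega
  rw [h1, h2]; ring

theorem pvA_outer_eq (L : List Int) (S p : Int) (hp : 0 ≤ p) : ∀ (f : Nat) (k : Int) (R : List Int),
    (f : Int) = (L.length : Int) - p - k →
    pvA_outer L S p k R f = R ++ pvWinList L S p k f := by
  intro f
  induction f with
  | zero => intro k R _; simp [pvA_outer, pvWinList]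
  | succ f ih =>
    intro k R h
    have hlt : k < (L.length : Int) - p := by push_cast at h; omega
    rw [pvA_outer, if_pos hlt]
    have hcpt : pvA_inner L (p + k) (PySem.List.pyGetD L k 0) (k + 1) p.toNat = pvWin L p k := by
      rw [pvA_inner_eq L p.toNat (p + k) _ (k + 1) (by omega)]
      show _ = pvSumFrom L k (p.toNat + 1)
      simp [pvSumFrom]
    rw [hcpt, ih (k + 1) _ (by push_cast at h ⊢; omega)]
    rw [pvWinList]
    split_ifs <;> simp

theorem pvB_fold_eq (L : List Int) (S p : Int) (hp : 0 ≤ p) : ∀ (f : Nat) (k s : Int) (R : List Int),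
    1 ≤ k → (f : Int) = (L.length : Int) - p - k → s = pvWin L p (k - 1) →
    ((PySem.List.pyRange k ((L.length : Int) - p) 1).foldl
      (fun (st : Int × List Int) k =>
        (if k > 0 then st.1 + PySem.List.pyGetD L (k + p) 0 - PySem.List.pyGetD L (k - 1) 0 else st.1,
         if (if k > 0 then st.1 + PySem.List.pyGetD L (k + p) 0 - PySem.List.pyGetD L (k - 1) 0 else st.1) ≥ S
         then st.2 ++ [k] else st.2))
      (s, R)).2 = R ++ pvWinList L S p k f := by
  intro f
  induction f with
  | zero =>
    intro k s R _ h _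
    have hle : (L.length : Int) - p ≤ k := by push_cast at h; omega
    have : PySem.List.pyRange k ((L.length : Int) - p) 1 = [] := by
      rw [PySem.List.pyRange_one]
      have : ((L.length : Int) - p - k).toNat = 0 := by omega
      simp [this]
    rw [this]; simp [pvWinList]
  | succ f ih =>
    intro k s R hk h hs
    have hlt : k < (L.length : Int) - p := by push_cast at h; omega
    rw [PySem.List.pyRange_one_cons hlt, List.foldl_cons]
    have hpos : k > 0 := by omega
    simp only [if_pos hpos]
    rw [ih (k + 1) _ _ (by omega) (by push_cast at h ⊢; omega)
      (by rw [add_sub_cancel_right, hs, pvWin_slide L p k hp hk])]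
    rw [hs, ← pvWin_slide L p k hp hk, pvWinList]
    split_ifs <;> simp

theorem pvSumFrom_eq_take (L : List Int) : ∀ (m i : Nat),
    pvSumFrom L (i : Int) m = ((L.drop i).take m).sum := by
  intro m
  induction m with
  | zero => intro i; simp [pvSumFrom]
  | succ m ih =>
    intro i
    rw [pvSumFrom]
    have hcast : ((i : Int) + 1) = ((i + 1 : Nat) : Int) := by push_cast; ring
    by_cases hi : i < L.length
    · rw [List.drop_eq_getElem_cons hi, List.take_succ_cons, List.sum_cons]
      rw [hcast, ih (i + 1)]
      simp [List.getD_eq_getElem?_getD, List.getElem?_eq_getElem hi]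
    · have hd : L.drop i = [] := by simp [List.drop_eq_nil_iff]; omega
      have hd1 : L.drop (i + 1) = [] := by simp [List.drop_eq_nil_iff]; omega
      have hg : PySem.List.pyGetD L (i : Int) 0 = 0 := by
        simp [List.getD_eq_getElem?_getD, List.getElem?_eq_none (by omega : L.length ≤ i)]
      rw [hg, hcast, ih (i + 1), hd, hd1]
      simp

-- s0 = sum(L[:p+1]) equals the first window sum (extra out-of-range terms are 0)
theorem pvSlice_sum_eq_win (L : List Int) (p : Int) (hp : 0 ≤ p) :
    (PySem.List.slice L none (some (p + 1))).sum = pvWin L p 0 := by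
  rw [PySem.List.slice_to L (show (0 : Int) ≤ p + 1 by omega)]
  have h0 : pvWin L p 0 = pvSumFrom L ((0 : Nat) : Int) (p.toNat + 1) := by simp [pvWin]
  rw [h0, pvSumFrom_eq_take L (p.toNat + 1) 0]
  have : (p + 1).toNat = p.toNat + 1 := by omega
  simp [this]

-- ===== VERDICT (by name: the statement is the Claim_ definition above) =====
theorem recherche2_spec : Claim_equal_recherche2 := by
  intro L S p _ hp
  unfold Spec_recherche2 recherche2 recherche2_alt
  show pvA_outer L S p 0 [] ((L.length : Int) - p).toNat =
    ((PySem.List.pyRange 0 ((L.length : Int) - p) 1).foldl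
      (fun (st : Int × List Int) k =>
        let s := if k > 0 then st.1 + PySem.List.pyGetD L (k + p) 0 - PySem.List.pyGetD L (k - 1) 0 else st.1
        (s, if s ≥ S then st.2 ++ [k] else st.2))
      ((PySem.List.slice L none (some (p + 1))).sum, [])).2
  by_cases hnp : (L.length : Int) - p ≤ 0
  · have hf : ((L.length : Int) - p).toNat = 0 := by omega
    have hr : PySem.List.pyRange 0 ((L.length : Int) - p) 1 = [] := by
      rw [PySem.List.pyRange_one]
      simp only [sub_zero]
      rw [(by omega : ((L.length : Int) - p).toNat = 0)]
      rfl
    rw [hf, hr]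
    simp [pvA_outer]
  · have hnp' : 0 < (L.length : Int) - p := by omega
    have hf : ((L.length : Int) - p).toNat = ((L.length : Int) - p - 1).toNat + 1 := by omega
    rw [pvA_outer_eq L S p hp _ 0 [] (by omega)]
    rw [PySem.List.pyRange_one_cons (by omega : (0 : Int) < (L.length : Int) - p), List.foldl_cons]
    have h0 : ¬ ((0 : Int) > 0) := by omega
    simp only [if_neg h0, zero_add]
    rw [pvB_fold_eq L S p hp ((L.length : Int) - p - 1).toNat 1
      ((PySem.List.slice L none (some (p + 1))).sum)
      (if (PySem.List.slice L none (some (p + 1))).sum ≥ S then ([] : List Int) ++ [0] else [])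
      (by omega) (by omega) (by rw [pvSlice_sum_eq_win L p hp]; norm_num)]
    rw [hf, pvWinList, pvSlice_sum_eq_win L p hp]
    simp
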